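-- pv_equiv track=rewrite | github.com/madeibao/PythonAlgorithm | PartA/py第k个数字.py | getKthMagicNumber
-- ===== SOURCE A (Python) =====
-- def getKthMagicNumber(k: int) -> int:
--     x3,x5,x7=0,0,0
--     result = [1]
--     for _ in range(1,k):
--         result.append(min(3*result[x3],5*result[x5],7*result[x7]))
--         if result[-1] == 3*result[x3] : x3+=1
--         if result[-1] == 5*result[x5] : x5+=1
--         if result[-1] == 7*result[x7] : x7+=1
--     return result[-1]
-- ===== SOURCE B (Python) =====
-- def getKthMagicNumber(k: int) -> int:
--     # Batched generation: r always holds ALL magic numbers up to its last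
--     # element, in increasing order.  Each round takes cur = r[-1] and appends,
--     # in one go, every magic number in (cur, 3*cur]: each such number is f*v
--     # for f in {3,5,7} and some v already in r (since m/f <= cur), and only
--     # the tail with 7*v > cur can contribute.  Candidates are deduplicated
--     # with a set and sorted.  Repeat until at least k numbers exist.
--     if k < 1:
--         return 1
--     r = [1]
--     while len(r) < k:
--         cur = r[-1]
--         tail = []
--         for v in reversed(r):
--             if 7 * v <= cur:
--                 break
--             tail.append(v)
--         lim = 3 * cur
--         cands = set()
--         for v in tail:
--             for f in (3, 5, 7):
--                 m = f * v
--                 if cur < m <= lim: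
--                     cands.add(m)
--         r.extend(sorted(cands))
--     return r[k - 1]
-- ===== Notes on version B (the rewrite author's own statement) =====
-- stated objective: alternative
-- what changed: Replaces A's incremental three-pointer merge by batched generation: keep the full sorted list of magic numbers found so far and repeatedly append, in one round, ALL magic numbers in (cur, 3*cur] (computed as deduplicated, sorted multiples 3v/5v/7v of the tail of the list), until k numbers exist; no per-factor pointers are maintained.
import Mathlib
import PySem

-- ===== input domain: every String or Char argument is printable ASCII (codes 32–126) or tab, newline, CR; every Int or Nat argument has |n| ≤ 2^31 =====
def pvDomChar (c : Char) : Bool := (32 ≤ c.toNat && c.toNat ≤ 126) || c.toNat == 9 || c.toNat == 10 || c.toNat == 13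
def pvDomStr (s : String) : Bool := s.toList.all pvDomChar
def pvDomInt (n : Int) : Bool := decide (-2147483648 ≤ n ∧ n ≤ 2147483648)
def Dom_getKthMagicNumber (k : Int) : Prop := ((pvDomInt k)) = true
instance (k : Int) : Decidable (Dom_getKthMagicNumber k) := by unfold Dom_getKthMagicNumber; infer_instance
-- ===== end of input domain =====

-- B replaces A's incremental three-pointer merge by batched generation (append all magic numbers in (cur, 3*cur] per round, via set-dedup and sort); alternative structure, similar cost.


-- ===== PORT A =====
-- one loop iteration of A: append min(3*result[x3], 5*result[x5], 7*result[x7]), then advance the matching pointers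
def stepA (st : Int × Int × Int × List Int) : Int × Int × Int × List Int :=
  match st with
  | (x3, x5, x7, result) =>
    let m := min (3 * PySem.List.pyGetD result x3 0)
      (min (5 * PySem.List.pyGetD result x5 0) (7 * PySem.List.pyGetD result x7 0))
    let result' := result ++ [m]
    let last := PySem.List.pyGetD result' (-1) 0
    ( (if last = 3 * PySem.List.pyGetD result' x3 0 then x3 + 1 else x3),
      (if last = 5 * PySem.List.pyGetD result' x5 0 then x5 + 1 else x5),
      (if last = 7 * PySem.List.pyGetD result' x7 0 then x7 + 1 else x7),
      result' )

def getKthMagicNumber (k : Int) : Int :=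
  let fin := (PySem.List.pyRange 1 k 1).foldl (fun st _ => stepA st) (0, 0, 0, [1])
  PySem.List.pyGetD fin.2.2.2 (-1) 0

-- ===== PORT B =====
-- one round of B's while-loop: cur = r[-1]; tail = the reversed-order elements taken
-- until the first v with 7*v <= cur (the Python 'for v in reversed(r): if 7*v<=cur: break'
-- is exactly takeWhile on the reversed list); cands = set of multiples f*v in (cur, 3*cur];
-- append sorted(cands).
def bstep (r : List Int) : List Int :=
  let cur := PySem.List.pyGetD r (-1) 0
  let tail := r.reverse.takeWhile (fun v => decide (cur < 7 * v))
  let lim := 3 * cur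
  let cands := tail.foldl (fun (s : PySem.Set Int) v =>
      [(3 : Int), 5, 7].foldl (fun s f =>
        let m := f * v
        if cur < m ∧ m ≤ lim then PySem.Set.add s m else s) s) PySem.Set.empty
  r ++ PySem.List.sorted cands (fun x => x) false

-- B's while-loop: repeat rounds until len(r) >= k.  The inner guard only certifies
-- termination (each round strictly grows r, proved below); it never fires.
def bloop (k : Int) (r : List Int) : List Int :=
  if (r.length : Int) < k then
    if r.length < (bstep r).length then bloop k (bstep r) else bstep r
  else r
termination_by k.toNat - r.length
decreasing_by omega

def getKthMagicNumber_alt (k : Int) : Int :=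
  if k < 1 then 1
  else PySem.List.pyGetD (bloop k [1]) (k - 1) 0

-- ===== PRECONDITION & SPEC =====
def Spec_getKthMagicNumber (k : Int) (out : Int) : Prop := out = getKthMagicNumber_alt k
instance (k : Int) (out : Int) : Decidable (Spec_getKthMagicNumber k out) := by unfold Spec_getKthMagicNumber; infer_instance

-- ===== CLAIM (what is proved, stated in full; the proofs are below) =====
def Claim_equal_getKthMagicNumber : Prop := ∀ (k : Int), Dom_getKthMagicNumber k → Spec_getKthMagicNumber k (getKthMagicNumber k)

-- ===== LEMMAS AND PROOFS =====

-- the current last element, as both programs read it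
def lastD (r : List Int) : Int := PySem.List.pyGetD r (-1) 0

-- pointer invariant of A: x is the least index whose f-multiple exceeds the last element
def Ptr (f x : Int) (r : List Int) : Prop :=
  0 ≤ x ∧ x < (r.length : Int) ∧
  (∀ j : Nat, (j : Int) < x → f * r.getD j 0 ≤ lastD r) ∧
  lastD r < f * r.getD x.toNat 0

-- full invariant of A's loop state
def InvA (x3 x5 x7 : Int) (r : List Int) : Prop :=
  r ≠ [] ∧ (∀ a ∈ r, 1 ≤ a) ∧ r.Pairwise (· < ·) ∧ Ptr 3 x3 r ∧ Ptr 5 x5 r ∧ Ptr 7 x7 r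

-- shape invariant shared with B's list
def PGood (r : List Int) : Prop :=
  r ≠ [] ∧ (∀ a ∈ r, 1 ≤ a) ∧ r.Pairwise (· < ·)

-- the candidate multiples of r exceeding its last element, and the canonical successor
def candsOf (r : List Int) : List Int :=
  r.flatMap (fun v => List.filter (fun m => decide (lastD r < m)) [3 * v, 5 * v, 7 * v])

def nxt (r : List Int) : Int := (PySem.List.min? (candsOf r) (fun x => x)).getD 0

def chainStep (r : List Int) : List Int := r ++ [nxt r]

def chain (n : Nat) : List Int := chainStep^[n] [1]

def headMin (x3 x5 x7 : Int) (r : List Int) : Int :=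
  min (3 * PySem.List.pyGetD r x3 0)
    (min (5 * PySem.List.pyGetD r x5 0) (7 * PySem.List.pyGetD r x7 0))

lemma chain_succ (n : Nat) : chain (n + 1) = chainStep (chain n) :=
  Function.iterate_succ_apply' chainStep n [1]

lemma foldl_const {σ α : Type} (f : σ → σ) (l : List α) (init : σ) :
    l.foldl (fun s _ => f s) init = f^[l.length] init := by
  induction l generalizing init with
  | nil => rfl
  | cons x xs ih => simp [List.foldl, ih, Function.iterate_succ_apply]

lemma pyGetD_toNat (r : List Int) (x : Int) (h0 : 0 ≤ x) (hl : x < (r.length : Int)) :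
    PySem.List.pyGetD r x 0 = r.getD x.toNat 0 := by
  rw [PySem.List.pyGetD_eq_getElem r 0 h0 hl, List.getD_eq_getElem r 0 (by omega)]

lemma pyGetD_append_of_lt (r : List Int) (y x : Int) (h0 : 0 ≤ x) (hl : x < (r.length : Int)) :
    PySem.List.pyGetD (r ++ [y]) x 0 = PySem.List.pyGetD r x 0 := by
  rw [PySem.List.pyGetD_eq_getElem (r ++ [y]) 0 h0 (by simp; omega),
    PySem.List.pyGetD_eq_getElem r 0 h0 hl]
  exact List.getElem_append_left (by omega)

lemma getD_mono (r : List Int) (hs : r.Pairwise (· < ·)) (i j : Nat) (hij : i ≤ j)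
    (hj : j < r.length) : r.getD i 0 ≤ r.getD j 0 := by
  rw [List.getD_eq_getElem r 0 (by omega), List.getD_eq_getElem r 0 hj]
  rcases Nat.lt_or_ge i j with h | h
  · exact le_of_lt ((List.pairwise_iff_getElem.mp hs) i j _ _ h)
  · have : i = j := by omega
    subst this; rfl

lemma le_lastD (r : List Int) (hne : r ≠ []) (hs : r.Pairwise (· < ·)) (a : Int) (ha : a ∈ r) :
    a ≤ lastD r := by
  obtain ⟨j, hj, rfl⟩ := List.mem_iff_getElem.mp ha
  have hlen : 0 < r.length := List.length_pos_of_ne_nil hne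
  have : lastD r = r.getD (r.length - 1) 0 := by
    unfold lastD
    rw [PySem.List.pyGetD_neg_one r 0 hne, List.getLast_eq_getElem,
      List.getD_eq_getElem r 0 (by omega)]
  rw [this, ← List.getD_eq_getElem r 0 hj]
  exact getD_mono r hs j (r.length - 1) (by omega) (by omega)

lemma lastD_mem (r : List Int) (hne : r ≠ []) : lastD r ∈ r := by
  unfold lastD; rw [PySem.List.pyGetD_neg_one r 0 hne]; exact List.getLast_mem hne

lemma lastD_append (r : List Int) (m : Int) : lastD (r ++ [m]) = m := by
  unfold lastD; rw [PySem.List.pyGetD_neg_one_append_singleton]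

lemma min?_getD_eq (l : List Int) (m : Int) (hm : m ∈ l) (hmin : ∀ y ∈ l, m ≤ y) :
    (PySem.List.min? l (fun x => x)).getD 0 = m := by
  cases h : PySem.List.min? l (fun x => x) with
  | none =>
    rw [PySem.List.min?_eq_none_iff] at h
    subst h; cases hm
  | some m' =>
    have h1 : m' ∈ l := PySem.List.min?_mem h
    have h2 := PySem.List.min?_isMin h
    have := h2 m hm
    have := hmin m' h1
    simp only [Option.getD_some]
    omega

lemma mem_candsOf (r : List Int) (y : Int) :
    y ∈ candsOf r ↔ ∃ v ∈ r, (y = 3 * v ∨ y = 5 * v ∨ y = 7 * v) ∧ lastD r < y := by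
  simp only [candsOf, List.mem_flatMap, List.mem_filter, List.mem_cons, List.not_mem_nil,
    or_false, decide_eq_true_eq]

-- every candidate with factor f is at least f*r[x], A's head reading
lemma cand_lower (f x : Int) (r : List Int) (hs : r.Pairwise (· < ·)) (hp : Ptr f x r)
    (hf : 0 < f) (v : Int) (hv : v ∈ r) (hlt : lastD r < f * v) :
    f * r.getD x.toNat 0 ≤ f * v := by
  obtain ⟨h0, hl, hsmall, _⟩ := hp
  obtain ⟨j, hj, rfl⟩ := List.mem_iff_getElem.mp hv
  rw [← List.getD_eq_getElem r 0 hj] at hlt ⊢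
  by_cases hjx : (j : Int) < x
  · exact absurd (hsmall j hjx) (by omega)
  · exact mul_le_mul_of_nonneg_left (getD_mono r hs x.toNat j (by omega) hj) (by omega)

-- A's pointer-based head minimum is the canonical successor
lemma headMin_eq_nxt (x3 x5 x7 : Int) (r : List Int) (h : InvA x3 x5 x7 r) :
    nxt r = headMin x3 x5 x7 r := by
  obtain ⟨hne, _hpos, hs, hp3, hp5, hp7⟩ := h
  have e3 := pyGetD_toNat r x3 hp3.1 hp3.2.1
  have e5 := pyGetD_toNat r x5 hp5.1 hp5.2.1
  have e7 := pyGetD_toNat r x7 hp7.1 hp7.2.1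
  have hmem3 : r.getD x3.toNat 0 ∈ r := by
    rw [List.getD_eq_getElem r 0 (by have := hp3.2.1; have := hp3.1; omega)]
    exact List.getElem_mem _
  have hmem5 : r.getD x5.toNat 0 ∈ r := by
    rw [List.getD_eq_getElem r 0 (by have := hp5.2.1; have := hp5.1; omega)]
    exact List.getElem_mem _
  have hmem7 : r.getD x7.toNat 0 ∈ r := by
    rw [List.getD_eq_getElem r 0 (by have := hp7.2.1; have := hp7.1; omega)]
    exact List.getElem_mem _
  have hm_mem : headMin x3 x5 x7 r ∈ candsOf r := by
    rw [mem_candsOf]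
    have h3 := hp3.2.2.2; have h5 := hp5.2.2.2; have h7 := hp7.2.2.2
    unfold headMin; rw [e3, e5, e7]
    rcases le_total (3 * r.getD x3.toNat 0) (min (5 * r.getD x5.toNat 0) (7 * r.getD x7.toNat 0)) with h | h
    · exact ⟨r.getD x3.toNat 0, hmem3, Or.inl (by omega), by omega⟩
    · rcases le_total (5 * r.getD x5.toNat 0) (7 * r.getD x7.toNat 0) with h' | h'
      · exact ⟨r.getD x5.toNat 0, hmem5, Or.inr (Or.inl (by omega)), by omega⟩
      · exact ⟨r.getD x7.toNat 0, hmem7, Or.inr (Or.inr (by omega)), by omega⟩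
  have hm_min : ∀ y ∈ candsOf r, headMin x3 x5 x7 r ≤ y := by
    intro y hy
    rw [mem_candsOf] at hy
    obtain ⟨v, hv, hform, hlt⟩ := hy
    unfold headMin; rw [e3, e5, e7]
    rcases hform with rfl | rfl | rfl
    · have := cand_lower 3 x3 r hs hp3 (by omega) v hv hlt; omega
    · have := cand_lower 5 x5 r hs hp5 (by omega) v hv hlt; omega
    · have := cand_lower 7 x7 r hs hp7 (by omega) v hv hlt; omega
  unfold nxt
  exact min?_getD_eq (candsOf r) _ hm_mem hm_min

lemma lastD_lt_headMin (x3 x5 x7 : Int) (r : List Int) (h : InvA x3 x5 x7 r) :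
    lastD r < headMin x3 x5 x7 r := by
  obtain ⟨hne, _, hs, hp3, hp5, hp7⟩ := h
  have e3 := pyGetD_toNat r x3 hp3.1 hp3.2.1
  have e5 := pyGetD_toNat r x5 hp5.1 hp5.2.1
  have e7 := pyGetD_toNat r x7 hp7.1 hp7.2.1
  have h3 := hp3.2.2.2; have h5 := hp5.2.2.2; have h7 := hp7.2.2.2
  unfold headMin; rw [e3, e5, e7]; omega

-- generic pointer preservation through one step of A
lemma ptr_step (f x : Int) (r : List Int) (m : Int) (hf : 3 ≤ f)
    (hne : r ≠ []) (hpos : ∀ a ∈ r, 1 ≤ a) (hs : r.Pairwise (· < ·))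
    (hp : Ptr f x r) (hmlt : lastD r < m) (hmle : m ≤ f * r.getD x.toNat 0) :
    Ptr f (if m = f * r.getD x.toNat 0 then x + 1 else x) (r ++ [m]) := by
  obtain ⟨h0, hl, hsmall, hbig⟩ := hp
  have hm1 : 1 ≤ m := by
    have := hpos _ (lastD_mem r hne); omega
  have hgetD_app : ∀ j : Nat, j < r.length → (r ++ [m]).getD j 0 = r.getD j 0 := by
    intro j hj
    rw [List.getD_eq_getElem _ 0 (by simp; omega), List.getD_eq_getElem r 0 hj]
    exact List.getElem_append_left hj
  have hgetD_len : (r ++ [m]).getD r.length 0 = m := by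
    rw [List.getD_eq_getElem _ 0 (by simp)]
    simp
  unfold Ptr
  rw [lastD_append]
  constructor
  · split_ifs <;> omega
  constructor
  · simp only [List.length_append, List.length_cons, List.length_nil]
    split_ifs <;> push_cast <;> omega
  constructor
  · intro j hj
    split_ifs at hj with hadv
    · by_cases hjx : (j : Int) < x
      · have := hsmall j hjx
        rw [hgetD_app j (by omega)]
        omega
      · have hjx' : (j : Int) = x := by omega
        have : j = x.toNat := by omega
        subst this
        rw [hgetD_app x.toNat (by omega)]
        omega
    · have := hsmall j hj
      rw [hgetD_app j (by omega)]
      omega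
  · split_ifs with hadv
    · by_cases hend : x.toNat + 1 < r.length
      · have hmono : r.getD x.toNat 0 < r.getD (x.toNat + 1) 0 := by
          rw [List.getD_eq_getElem r 0 (by omega), List.getD_eq_getElem r 0 hend]
          exact (List.pairwise_iff_getElem.mp hs) x.toNat (x.toNat + 1) _ _ (by omega)
        have hx1 : (x + 1).toNat = x.toNat + 1 := by omega
        rw [hx1, hgetD_app (x.toNat + 1) hend]
        have hpos' : 1 ≤ r.getD x.toNat 0 := by
          have : r.getD x.toNat 0 ∈ r := by
            rw [List.getD_eq_getElem r 0 (by omega)]; exact List.getElem_mem _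
          exact hpos _ this
        nlinarith
      · have hx1 : (x + 1).toNat = r.length := by omega
        rw [hx1, hgetD_len]
        nlinarith
    · have : m < f * r.getD x.toNat 0 := by omega
      rw [hgetD_app x.toNat (by omega)]
      omega

lemma stepA_result (x3 x5 x7 : Int) (r : List Int) :
    (stepA (x3, x5, x7, r)).2.2.2 = r ++ [headMin x3 x5 x7 r] := rfl

lemma inv_stepA (x3 x5 x7 : Int) (r : List Int) (h : InvA x3 x5 x7 r) :
    InvA (stepA (x3, x5, x7, r)).1 (stepA (x3, x5, x7, r)).2.1 (stepA (x3, x5, x7, r)).2.2.1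
      (stepA (x3, x5, x7, r)).2.2.2 := by
  obtain ⟨hne, hpos, hs, hp3, hp5, hp7⟩ := h
  have e3 := pyGetD_toNat r x3 hp3.1 hp3.2.1
  have e5 := pyGetD_toNat r x5 hp5.1 hp5.2.1
  have e7 := pyGetD_toNat r x7 hp7.1 hp7.2.1
  set m := headMin x3 x5 x7 r with hm
  have hmlt : lastD r < m := lastD_lt_headMin x3 x5 x7 r ⟨hne, hpos, hs, hp3, hp5, hp7⟩
  have hm1 : 1 ≤ m := by
    have := hpos _ (lastD_mem r hne); omega
  have hstep : stepA (x3, x5, x7, r) =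
      ( (if m = 3 * r.getD x3.toNat 0 then x3 + 1 else x3),
        (if m = 5 * r.getD x5.toNat 0 then x5 + 1 else x5),
        (if m = 7 * r.getD x7.toNat 0 then x7 + 1 else x7),
        r ++ [m] ) := by
    unfold stepA
    simp only []
    rw [PySem.List.pyGetD_neg_one_append_singleton,
      pyGetD_append_of_lt r _ x3 hp3.1 hp3.2.1,
      pyGetD_append_of_lt r _ x5 hp5.1 hp5.2.1,
      pyGetD_append_of_lt r _ x7 hp7.1 hp7.2.1, e3, e5, e7]
    rw [hm]; unfold headMin; rw [e3, e5, e7]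
  rw [hstep]
  refine ⟨by simp, ?_, ?_, ?_, ?_, ?_⟩
  · intro a ha
    rcases List.mem_append.mp ha with h' | h'
    · exact hpos a h'
    · simp at h'; omega
  · rw [List.pairwise_append]
    refine ⟨hs, by simp, ?_⟩
    intro a ha b hb
    simp at hb; subst hb
    have := le_lastD r hne hs a ha; omega
  · exact ptr_step 3 x3 r m (by omega) hne hpos hs hp3 hmlt (by rw [hm]; unfold headMin; rw [e3]; omega)
  · exact ptr_step 5 x5 r m (by omega) hne hpos hs hp5 hmlt (by rw [hm]; unfold headMin; rw [e5]; omega)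
  · exact ptr_step 7 x7 r m (by omega) hne hpos hs hp7 hmlt (by rw [hm]; unfold headMin; rw [e7]; omega)

-- A's iterates carry the invariant and produce the canonical chain
lemma iterate_eq (n : Nat) :
    InvA (stepA^[n] (0, 0, 0, [1])).1 (stepA^[n] (0, 0, 0, [1])).2.1
      (stepA^[n] (0, 0, 0, [1])).2.2.1 (stepA^[n] (0, 0, 0, [1])).2.2.2 ∧
    (stepA^[n] (0, 0, 0, [1])).2.2.2 = chain n := by
  induction n with
  | zero =>
    simp only [Function.iterate_zero, id_eq]
    refine ⟨⟨by simp, by simp, by simp, ?_, ?_, ?_⟩, rfl⟩ <;>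
      exact ⟨le_refl 0, by simp, by intro j hj; exact absurd hj (by omega), by decide⟩
  | succ n ih =>
    obtain ⟨hinv, heq⟩ := ih
    have hE : ∃ x3 x5 x7 r, stepA^[n] ((0:Int), (0:Int), (0:Int), ([1]:List Int)) = (x3, x5, x7, r) :=
      ⟨_, _, _, _, rfl⟩
    obtain ⟨x3, x5, x7, r, hE⟩ := hE
    rw [hE] at hinv heq
    rw [Function.iterate_succ_apply', hE]
    refine ⟨inv_stepA x3 x5 x7 r hinv, ?_⟩
    rw [stepA_result, chain_succ, ← heq, chainStep, headMin_eq_nxt x3 x5 x7 r hinv]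

lemma PGood_of_InvA (x3 x5 x7 : Int) (r : List Int) (h : InvA x3 x5 x7 r) : PGood r :=
  ⟨h.1, h.2.1, h.2.2.1⟩

lemma chain_PGood (n : Nat) : PGood (chain n) := by
  obtain ⟨hinv, heq⟩ := iterate_eq n
  rw [← heq]
  exact PGood_of_InvA _ _ _ _ hinv

lemma chain_length (n : Nat) : (chain n).length = n + 1 := by
  induction n with
  | zero => rfl
  | succ n ih =>
    rw [chain_succ]
    simp [chainStep, ih]

lemma chain_prefix (n m : Nat) (h : n ≤ m) : chain n <+: chain m := by
  induction m with
  | zero =>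
    have : n = 0 := by omega
    subst this; exact List.prefix_rfl
  | succ m ih =>
    by_cases hn : n = m + 1
    · subst hn; exact List.prefix_rfl
    · have := ih (by omega)
      exact this.trans (by rw [chain_succ]; exact ⟨[nxt (chain m)], rfl⟩)

-- ---- B-side: characterizing one bstep ----

-- takeWhile on a descending list is filter, for a downward-closed-from-above predicate
lemma takeWhile_eq_filter_desc (p : Int → Bool) (l : List Int)
    (hmono : ∀ a b : Int, b ≤ a → p a = false → p b = false)
    (hl : l.Pairwise (fun a b => b ≤ a)) : l.takeWhile p = l.filter p := by
  induction l with
  | nil => rfl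
  | cons a t ih =>
    rw [List.pairwise_cons] at hl
    cases hpa : p a with
    | true =>
      rw [List.takeWhile_cons_of_pos hpa, List.filter_cons_of_pos hpa, ih hl.2]
    | false =>
      rw [List.takeWhile_cons_of_neg (by simp [hpa]), List.filter_cons_of_neg (by simp [hpa])]
      rw [eq_comm, List.filter_eq_nil_iff]
      intro b hb
      simp only [Bool.not_eq_true]
      exact hmono a b (hl.1 b hb) hpa

lemma mem_condAdd (s : PySem.Set Int) (c : Prop) [Decidable c] (m y : Int) :
    y ∈ (if c then PySem.Set.add s m else s) ↔ y ∈ s ∨ (y = m ∧ c) := by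
  split_ifs with hc <;> simp [PySem.Set.mem_add] <;> tauto

-- membership in the set built by the two nested for-loops of bstep
lemma mem_inner (cur lim v y : Int) (s : PySem.Set Int) :
    y ∈ ([(3 : Int), 5, 7].foldl (fun s f =>
        let m := f * v
        if cur < m ∧ m ≤ lim then PySem.Set.add s m else s) s) ↔
      y ∈ s ∨ ((y = 3 * v ∨ y = 5 * v ∨ y = 7 * v) ∧ cur < y ∧ y ≤ lim) := by
  simp only [List.foldl]
  rw [mem_condAdd, mem_condAdd, mem_condAdd]
  constructor
  · rintro (((h | ⟨rfl, hc1, hc2⟩) | ⟨rfl, hc1, hc2⟩) | ⟨rfl, hc1, hc2⟩)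
    · exact Or.inl h
    · exact Or.inr ⟨Or.inl rfl, hc1, hc2⟩
    · exact Or.inr ⟨Or.inr (Or.inl rfl), hc1, hc2⟩
    · exact Or.inr ⟨Or.inr (Or.inr rfl), hc1, hc2⟩
  · rintro (h | ⟨rfl | rfl | rfl, hcur, hlim⟩)
    · exact Or.inl (Or.inl (Or.inl h))
    · exact Or.inl (Or.inl (Or.inr ⟨rfl, hcur, hlim⟩))
    · exact Or.inl (Or.inr ⟨rfl, hcur, hlim⟩)
    · exact Or.inr ⟨rfl, hcur, hlim⟩

lemma mem_outer (cur lim y : Int) (tl : List Int) (s : PySem.Set Int) :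
    y ∈ (tl.foldl (fun (s : PySem.Set Int) v =>
        [(3 : Int), 5, 7].foldl (fun s f =>
          let m := f * v
          if cur < m ∧ m ≤ lim then PySem.Set.add s m else s) s) s) ↔
      y ∈ s ∨ ∃ v ∈ tl, (y = 3 * v ∨ y = 5 * v ∨ y = 7 * v) ∧ cur < y ∧ y ≤ lim := by
  induction tl generalizing s with
  | nil => simp
  | cons a t ih =>
    rw [List.foldl_cons, ih, mem_inner]
    constructor
    · rintro ((h | h) | ⟨v, hv, hform⟩)
      · exact Or.inl h
      · exact Or.inr ⟨a, by simp, h⟩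
      · exact Or.inr ⟨v, by simp [hv], hform⟩
    · rintro (h | ⟨v, hv, hform⟩)
      · exact Or.inl (Or.inl h)
      · rcases List.mem_cons.mp hv with rfl | hv
        · exact Or.inl (Or.inr hform)
        · exact Or.inr ⟨v, hv, hform⟩

-- the set built by bstep holds exactly the candidates bounded by 3*cur
lemma mem_bset (r : List Int) (hP : PGood r) (y : Int) :
    y ∈ ((r.reverse.takeWhile (fun v => decide (lastD r < 7 * v))).foldl
        (fun (s : PySem.Set Int) v =>
          [(3 : Int), 5, 7].foldl (fun s f =>
            let m := f * v
            if lastD r < m ∧ m ≤ 3 * lastD r then PySem.Set.add s m else s) s)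
        PySem.Set.empty) ↔
      y ∈ candsOf r ∧ y ≤ 3 * lastD r := by
  obtain ⟨hne, hpos, hs⟩ := hP
  have htail : r.reverse.takeWhile (fun v => decide (lastD r < 7 * v)) =
      r.reverse.filter (fun v => decide (lastD r < 7 * v)) := by
    refine takeWhile_eq_filter_desc _ _ ?_ ?_
    · intro a b hba hpa
      simp only [decide_eq_false_iff_not, not_lt] at hpa ⊢
      omega
    · rw [List.pairwise_reverse]
      exact hs.imp le_of_lt
  rw [htail, mem_outer]
  simp only [PySem.Set.empty]
  constructor
  · rintro (h | ⟨v, hv, hform, hcur, hlim⟩)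
    · simp at h
    · rw [List.mem_filter, List.mem_reverse] at hv
      refine ⟨(mem_candsOf r y).mpr ⟨v, hv.1, hform, hcur⟩, hlim⟩
  · rintro ⟨hc, hlim⟩
    obtain ⟨v, hv, hform, hcur⟩ := (mem_candsOf r y).mp hc
    have hv1 : 1 ≤ v := hpos v hv
    refine Or.inr ⟨v, ?_, hform, hcur, hlim⟩
    rw [List.mem_filter, List.mem_reverse]
    refine ⟨hv, ?_⟩
    simp only [decide_eq_true_eq]
    rcases hform with rfl | rfl | rfl <;> omega

-- sets built by conditional adds are duplicate-free
lemma nodup_inner (cur lim v : Int) (s : PySem.Set Int) (hs : s.Nodup) :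
    ([(3 : Int), 5, 7].foldl (fun s f =>
        let m := f * v
        if cur < m ∧ m ≤ lim then PySem.Set.add s m else s) s).Nodup := by
  simp only [List.foldl]
  split_ifs <;> (repeat' apply PySem.Set.nodup_add) <;> exact hs

lemma nodup_outer (cur lim : Int) (tl : List Int) (s : PySem.Set Int) (hs : s.Nodup) :
    (tl.foldl (fun (s : PySem.Set Int) v =>
        [(3 : Int), 5, 7].foldl (fun s f =>
          let m := f * v
          if cur < m ∧ m ≤ lim then PySem.Set.add s m else s) s) s).Nodup := by
  induction tl generalizing s with
  | nil => exact hs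
  | cons a t ih => exact ih _ (nodup_inner cur lim a s hs)

lemma pairwise_lt_of_le_nodup (l : List Int) (h1 : l.Pairwise (· ≤ ·)) (h2 : l.Nodup) :
    l.Pairwise (· < ·) :=
  (h1.and h2).imp (fun h => lt_of_le_of_ne h.1 h.2)

-- one bstep appends the strictly sorted list of all candidates in (cur, 3*cur]
lemma bstep_batch (r : List Int) (hP : PGood r) :
    ∃ batch : List Int, bstep r = r ++ batch ∧ batch.Pairwise (· < ·) ∧
      (∀ m, m ∈ batch ↔ m ∈ candsOf r ∧ m ≤ 3 * lastD r) := by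
  refine ⟨_, rfl, ?_, ?_⟩
  · apply pairwise_lt_of_le_nodup
    · have := PySem.List.sorted_pairwise (key := fun x : Int => x)
        (xs := ((r.reverse.takeWhile (fun v => decide (PySem.List.pyGetD r (-1) 0 < 7 * v))).foldl
          (fun (s : PySem.Set Int) v =>
            [(3 : Int), 5, 7].foldl (fun s f =>
              let m := f * v
              if PySem.List.pyGetD r (-1) 0 < m ∧ m ≤ 3 * PySem.List.pyGetD r (-1) 0
              then PySem.Set.add s m else s) s) PySem.Set.empty))
      exact this
    · refine (PySem.List.sorted_perm _ _ _).nodup_iff.mpr ?_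
      exact nodup_outer _ _ _ _ (by simp [PySem.Set.empty])
  · intro m
    rw [PySem.List.mem_sorted]
    exact mem_bset r hP m

-- walking the chain through a sorted batch of candidates
lemma chain_walk (r batch : List Int) (hP : PGood r)
    (hsort : batch.Pairwise (· < ·))
    (hmem : ∀ m, m ∈ batch ↔ m ∈ candsOf r ∧ m ≤ 3 * lastD r) :
    ∀ i, i ≤ batch.length → chainStep^[i] r = r ++ batch.take i := by
  obtain ⟨hne, hpos, hs⟩ := hP
  have hbatch_gt : ∀ m ∈ batch, lastD r < m := by
    intro m hm
    obtain ⟨hc, _⟩ := (hmem m).mp hm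
    exact ((mem_candsOf r m).mp hc).choose_spec.2.2
  intro i
  induction i with
  | zero => simp
  | succ i ih =>
    intro hi1
    have hi : i < batch.length := by omega
    rw [Function.iterate_succ_apply', ih (by omega)]
    have htake : batch.take (i + 1) = batch.take i ++ [batch[i]] := by
      rw [List.take_add_one, List.getElem?_eq_getElem hi]
      rfl
    rw [chainStep, htake, ← List.append_assoc]
    congr 2
    -- nxt (r ++ batch.take i) = batch[i]
    set r' := r ++ batch.take i with hr'
    have hlast' : lastD r' = if h : i = 0 then lastD r else batch[i - 1]'(by omega) := by
      split_ifs with h0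
    -- i = 0 : take 0 = [] ; else last of the appended prefix
      · subst h0; simp [hr', lastD]
      · have : batch.take i = batch.take (i - 1) ++ [batch[i - 1]'(by omega)] := by
          rw [← List.take_succ_eq_append_getElem (by omega)]
          congr 1; omega
        rw [hr', this, ← List.append_assoc, lastD_append]
    have hlast_lt : lastD r' < batch[i] := by
      rw [hlast']
      split_ifs with h0
      · exact hbatch_gt _ (List.getElem_mem hi)
      · exact List.pairwise_iff_getElem.mp hsort (i - 1) i (by omega) hi (by omega)
    have hlast_ge : lastD r ≤ lastD r' := by
      rw [hlast']
      split_ifs with h0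
      · exact le_rfl
      · exact le_of_lt (hbatch_gt _ (List.getElem_mem (by omega)))
    have hmem_i : batch[i] ∈ candsOf r' := by
      obtain ⟨hc, hlim⟩ := (hmem batch[i]).mp (List.getElem_mem hi)
      obtain ⟨v, hv, hform, _⟩ := (mem_candsOf r _).mp hc
      exact (mem_candsOf r' _).mpr ⟨v, by simp [hr', hv], hform, hlast_lt⟩
    have hmin_i : ∀ y ∈ candsOf r', batch[i] ≤ y := by
      intro y hy
      obtain ⟨w, hw, hform, hyg⟩ := (mem_candsOf r' y).mp hy
      rcases List.mem_append.mp (by simpa [hr'] using hw) with hwr | hwb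
      · -- w comes from r: y is a candidate of r
        have hyc : y ∈ candsOf r := (mem_candsOf r y).mpr ⟨w, hwr, hform, by omega⟩
        by_cases hylim : y ≤ 3 * lastD r
        · -- y is in the batch and exceeds the current last: not before position i
          have hyb := (hmem y).mpr ⟨hyc, hylim⟩
          obtain ⟨t, ht, rfl⟩ := List.mem_iff_getElem.mp hyb
          by_cases hti : t < i
          · exfalso
            have : batch[t] ≤ lastD r' := by
              rw [hlast']
              split_ifs with h0
              · omega
              · rcases Nat.lt_or_ge t (i - 1) with h' | h'
                · exact le_of_lt (List.pairwise_iff_getElem.mp hsort t (i - 1) ht (by omega) h')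
                · have : t = i - 1 := by omega
                  subst this; exact le_rfl
            omega
          · rcases Nat.eq_or_lt_of_le (Nat.le_of_not_lt hti) with h' | h'
            · subst h'; exact le_rfl
            · exact le_of_lt (List.pairwise_iff_getElem.mp hsort i t hi ht h')
        · -- y beyond the window: larger than everything in the batch
          have : batch[i] ≤ 3 * lastD r := ((hmem _).mp (List.getElem_mem hi)).2
          omega
      · -- w is itself a new batch element: f*w > 3*cur >= batch[i]
        have hw_gt : lastD r < w := hbatch_gt w (List.mem_of_mem_take hwb)
        have hw1 : 1 ≤ lastD r := hpos _ (lastD_mem r hne)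
        have : batch[i] ≤ 3 * lastD r := ((hmem _).mp (List.getElem_mem hi)).2
        rcases hform with rfl | rfl | rfl <;> omega
    unfold nxt
    exact min?_getD_eq _ _ hmem_i hmin_i

-- one bstep equals a run of chain steps, of positive length
lemma bstep_chain (n : Nat) :
    ∃ b : Nat, 0 < b ∧ bstep (chain n) = chain (n + b) := by
  have hP := chain_PGood n
  obtain ⟨batch, hbs, hsort, hmem⟩ := bstep_batch (chain n) hP
  obtain ⟨hne, hpos, hs⟩ := hP
  have hwalk := chain_walk (chain n) batch ⟨hne, hpos, hs⟩ hsort hmem batch.length le_rfl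
  have hchain : chain (n + batch.length) = chain n ++ batch := by
    show chainStep^[n + batch.length] [1] = _
    rw [Nat.add_comm, Function.iterate_add_apply]
    show chainStep^[batch.length] (chain n) = _
    rw [hwalk, List.take_length]
  have hbne : batch ≠ [] := by
    intro h0
    have h3 : 3 * lastD (chain n) ∈ batch := by
      rw [hmem]
      have h1 : 1 ≤ lastD (chain n) := hpos _ (lastD_mem _ hne)
      exact ⟨(mem_candsOf _ _).mpr ⟨lastD (chain n), lastD_mem _ hne, Or.inl rfl, by omega⟩,
        le_rfl⟩
    rw [h0] at h3
    exact List.not_mem_nil h3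
  exact ⟨batch.length, by
    have := List.length_pos_of_ne_nil hbne
    omega, by rw [hbs, hchain]⟩

-- the while-loop lands on a chain long enough
lemma bloop_chain (k : Int) :
    ∀ fuel j, k.toNat - j ≤ fuel →
      ∃ m : Nat, j ≤ m ∧ bloop k (chain j) = chain m ∧ ¬ (((chain m).length : Int) < k) := by
  intro fuel
  induction fuel with
  | zero =>
    intro j hj
    refine ⟨j, le_rfl, ?_, ?_⟩
    · rw [bloop]
      rw [if_neg (by rw [chain_length]; omega)]
    · rw [chain_length]; omega
  | succ fuel ih =>
    intro j hj
    by_cases hlt : ((chain j).length : Int) < k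
    · obtain ⟨b, hb, hbs⟩ := bstep_chain j
      have hlen : (chain j).length < (bstep (chain j)).length := by
        rw [hbs, chain_length, chain_length]; omega
      obtain ⟨m, hm1, hm2, hm3⟩ := ih (j + b) (by rw [chain_length] at hlt; omega)
      refine ⟨m, by omega, ?_, hm3⟩
      rw [bloop, if_pos hlt]
      simp only [if_pos hlen]
      rw [hbs]
      exact hm2
    · refine ⟨j, le_rfl, ?_, hlt⟩
      rw [bloop, if_neg hlt]

-- ===== VERDICT (by name: the statement is the Claim_ definition above) =====
theorem getKthMagicNumber_spec : Claim_equal_getKthMagicNumber := by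
  intro k _
  unfold Spec_getKthMagicNumber getKthMagicNumber getKthMagicNumber_alt
  show PySem.List.pyGetD
      ((PySem.List.pyRange 1 k 1).foldl (fun st _ => stepA st) (0, 0, 0, [1])).2.2.2 (-1) 0 =
    if k < 1 then 1 else PySem.List.pyGetD (bloop k [1]) (k - 1) 0
  rw [foldl_const stepA, (iterate_eq ((PySem.List.pyRange 1 k 1).length)).2]
  set n := (PySem.List.pyRange 1 k 1).length with hn
  have hnval : (n : Int) = if k < 1 then 0 else k - 1 := by
    rw [hn, PySem.List.length_pyRange_one]
    split_ifs <;> omega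
  by_cases hk : k < 1
  · rw [if_pos hk]
    have hn0 : n = 0 := by rw [if_pos hk] at hnval; omega
    rw [hn0]
    decide
  · rw [if_neg hk]
    rw [if_neg hk] at hnval
    obtain ⟨m, hm1, hm2, hm3⟩ := bloop_chain k k.toNat 0 (by omega)
    have h0 : chain 0 = [1] := rfl
    rw [h0] at hm2
    rw [hm2]
    rw [chain_length] at hm3
    have hnm : n ≤ m := by omega
    have hkn : k - 1 = (n : Int) := by omega
    rw [hkn, PySem.List.pyGetD_natCast]
    -- left side: last element of chain n; right: chain m at index n
    have hpre := chain_prefix n m hnm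
    have hlen_n := chain_length n
    have hlen_m := chain_length m
    have hgetm : (chain m).getD n 0 = (chain n).getD n 0 := by
      have h2 : n < (chain n).length := by omega
      have h1 : n < (chain m).length := by omega
      rw [List.getD_eq_getElem (chain m) 0 h1, List.getD_eq_getElem (chain n) 0 h2]
      exact (hpre.getElem h2).symm
    rw [hgetm]
    have hne : chain n ≠ [] := (chain_PGood n).1
    rw [PySem.List.pyGetD_neg_one _ 0 hne, List.getLast_eq_getElem,
      List.getD_eq_getElem (chain n) 0 (by omega)]
    congr 1
    omega
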